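-- pv_equiv track=rewrite | github.com/namnh83/namnh83 | add_KALP_downtime.py | _group_servers_by_patch
-- ===== SOURCE A (Python) =====
-- from typing import NamedTuple, Generator
--
-- class CsvRow(NamedTuple):
--     server_name: str
--     date: str
--     patch_group: str
--
-- def _group_servers_by_patch(data: list[CsvRow]) -> dict[tuple[str, str], list[str]]:
--     """Groups servers by patchdate and patchgroup"""
--     grouped_servers: dict[tuple[str, str], list[str]] = {}
--     for server, patchdate, patchgroup in data:
--         key = (patchdate, patchgroup)
--
--         if key not in grouped_servers:
--             grouped_servers[key] = []
--
--         grouped_servers[key].append(server)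
--
--     return grouped_servers
-- ===== SOURCE B (Python) =====
-- from typing import NamedTuple
--
-- class CsvRow(NamedTuple):
--     server_name: str
--     date: str
--     patch_group: str
--
-- def _group_servers_by_patch(data):
--     """Groups servers by patchdate and patchgroup (two-pass: distinct keys, then one filter per key)."""
--     keys = list(dict.fromkeys((date, group) for _, date, group in data))
--     return {key: [s for s, d, g in data if (d, g) == key] for key in keys}
-- ===== Notes on version B (the rewrite author's own statement) =====
-- stated objective: alternative
-- what changed: Replaces the incremental dict-building loop (membership test + append per row) by a two-pass decomposition: first collect the distinct (date, group) keys in first-appearance order with dict.fromkeys, then build each group's server list by one filtering comprehension over the data per key.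
import Mathlib
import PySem

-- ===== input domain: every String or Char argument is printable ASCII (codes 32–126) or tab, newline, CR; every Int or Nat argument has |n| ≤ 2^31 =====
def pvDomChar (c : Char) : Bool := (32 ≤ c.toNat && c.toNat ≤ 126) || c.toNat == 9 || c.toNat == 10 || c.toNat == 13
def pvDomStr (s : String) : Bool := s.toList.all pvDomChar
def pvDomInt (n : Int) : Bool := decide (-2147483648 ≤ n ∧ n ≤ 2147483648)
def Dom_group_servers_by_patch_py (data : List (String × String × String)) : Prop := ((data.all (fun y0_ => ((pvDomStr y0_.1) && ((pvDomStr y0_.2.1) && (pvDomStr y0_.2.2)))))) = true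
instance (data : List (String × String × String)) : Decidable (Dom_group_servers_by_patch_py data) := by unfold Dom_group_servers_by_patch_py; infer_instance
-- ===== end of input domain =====

-- B builds the grouping in two passes (distinct keys, then one filter per key) instead of A's
-- incremental dict loop; same result, alternative decomposition (not faster).

-- ===== PORT A =====
-- A: for (server, patchdate, patchgroup) in data: key = (patchdate, patchgroup);
--    if key not in grouped: grouped[key] = []; grouped[key].append(server)
def group_servers_by_patch_py (data : List (String × String × String)) : List (String × String × List String) :=
  (data.foldl
    (fun d r =>
      let key := (r.2.1, r.2.2)
      let d := if d.contains key then d else d.insert key ([] : List String)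
      d.modify key [] (fun l => l ++ [r.1]))
    PySem.Dict.empty).items.map (fun p => (p.1.1, p.1.2, p.2))

-- ===== PORT B =====
-- B: keys = list(dict.fromkeys((date, group) ...)); {key: [s for s,d,g in data if (d,g)==key] for key in keys}
def group_servers_by_patch_py_alt (data : List (String × String × String)) : List (String × String × List String) :=
  let keys := PySem.List.dedup (data.map (fun r => (r.2.1, r.2.2)))
  keys.map (fun k => (k.1, k.2, (data.filter (fun r => (r.2.1, r.2.2) == k)).map (fun r => r.1)))

-- ===== PRECONDITION & SPEC =====
def Spec_group_servers_by_patch_py (data : List (String × String × String)) (out : List (String × String × List String)) : Prop := out = group_servers_by_patch_py_alt data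
instance (data : List (String × String × String)) (out : List (String × String × List String)) : Decidable (Spec_group_servers_by_patch_py data out) := by unfold Spec_group_servers_by_patch_py; infer_instance

-- ===== CLAIM (what is proved, stated in full; the proofs are below) =====
def Claim_equal_group_servers_by_patch_py : Prop := ∀ (data : List (String × String × String)), Dom_group_servers_by_patch_py data → Spec_group_servers_by_patch_py data (group_servers_by_patch_py data)

-- ===== LEMMAS AND PROOFS =====

-- A's per-row step: the "if absent, insert []" followed by the append-modify is one modify.
theorem pv_step_eq (d : PySem.Dict (String × String) (List String)) (k : String × String) (s : String) :
    (if d.contains k then d else d.insert k ([] : List String)).modify k [] (fun l => l ++ [s])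
      = d.modify k [] (fun l => l ++ [s]) := by
  by_cases h : d.contains k = true
  · simp [h]
  · simp only [Bool.not_eq_true] at h
    simp only [h, Bool.false_eq_true, if_false]
    simp [PySem.Dict.modify, PySem.Dict.insert_insert_self, PySem.Dict.getD_insert_self,
      PySem.Dict.getD_of_not_contains (h := h)]

-- A's fold collapsed to the modify-only fold, then characterised key-by-key.
theorem pv_main (data : List (String × String × String)) :
    (data.foldl (fun d r => d.modify (r.2.1, r.2.2) ([] : List String) (fun l => l ++ [r.1])) PySem.Dict.empty).items.map (fun p => (p.1.1, p.1.2, p.2))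
    = (PySem.List.dedup (data.map (fun r => (r.2.1, r.2.2)))).map
        (fun k => (k.1, k.2, (data.filter (fun r => (r.2.1, r.2.2) == k)).map (fun r => r.1))) := by
  have hfm : data.foldl (fun d r => d.modify (r.2.1, r.2.2) ([] : List String) (fun l => l ++ [r.1])) PySem.Dict.empty
      = (data.map (fun r => ((r.2.1, r.2.2), r.1))).foldl (fun d p => d.modify p.1 ([] : List String) (fun l => l ++ [p.2])) PySem.Dict.empty := by
    rw [List.foldl_map]
  rw [hfm]
  set l := data.map (fun r => ((r.2.1, r.2.2), r.1)) with hl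
  have hnd : ((l.foldl (fun d p => d.modify p.1 ([] : List String) (fun l => l ++ [p.2])) PySem.Dict.empty)).keys.Nodup := by
    exact PySem.Dict.nodup_keys_foldl_modify_key l (fun p => p.1) [] (fun d p => fun l => l ++ [p.2]) _ (by simp)
  rw [PySem.Dict.items_eq_map_keys _ hnd []]
  have hkeys : ((l.foldl (fun d p => d.modify p.1 ([] : List String) (fun l => l ++ [p.2])) PySem.Dict.empty)).keys
      = PySem.List.dedup (data.map (fun r => (r.2.1, r.2.2))) := by
    rw [PySem.Dict.keys_foldl_modify_key]
    simp [hl, PySem.Set.update_nil_left, List.map_map, Function.comp_def]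
  rw [hkeys, List.map_map]
  apply List.map_congr_left
  intro k hk
  simp only [Function.comp_def]
  congr 1
  congr 1
  rw [PySem.Dict.getD_foldl_modify_append]
  simp [hl, List.filter_map, Function.comp_def]

-- ===== VERDICT (by name: the statement is the Claim_ definition above) =====
theorem group_servers_by_patch_py_spec : Claim_equal_group_servers_by_patch_py := by
  intro data _
  unfold Spec_group_servers_by_patch_py group_servers_by_patch_py group_servers_by_patch_py_alt
  have hstep : (fun (d : PySem.Dict (String × String) (List String)) (r : String × String × String) =>
      (if d.contains (r.2.1, r.2.2) then d else d.insert (r.2.1, r.2.2) ([] : List String)).modify (r.2.1, r.2.2) [] (fun l => l ++ [r.1]))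
      = (fun d r => d.modify (r.2.1, r.2.2) ([] : List String) (fun l => l ++ [r.1])) := by
    funext d r; exact pv_step_eq d (r.2.1, r.2.2) r.1
  simp only [hstep]
  exact pv_main data
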